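-- pv_equiv track=rewrite | github.com/Atvaark/AdventOfCode2017 | day17.py | part_1
-- ===== SOURCE A (Python) =====
-- def part_1(step_len, iterations):
--     buffer = [0]
--     pos = 0
--     n = 0
--
--     for iter in range(iterations):
--         pos = (pos + step_len) % len(buffer)
--         n += 1
--         pos += 1
--         buffer.insert(pos, n)
--
--     after_pos = buffer[(pos+1)%len(buffer)]
--
--     # zero_index = buffer.index(0) if 0 in buffer else None
--     # if zero_index is not None:
--     #     after_zero = buffer[(zero_index+1)%len(buffer)]
--     # else:
--     #     after_zero = None
--     # return after_pos, after_zero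
--
--     return after_pos
-- ===== SOURCE B (Python) =====
-- def part_1(step_len, iterations):
--     # Record only the insertion position of each value (O(1) per step, no list
--     # mutation), then walk backwards through the insertions to find which value
--     # ends up in the slot just after the final position.
--     positions = [0]
--     pos = 0
--     for j in range(1, iterations + 1):
--         pos = (pos + step_len) % j + 1
--         positions.append(pos)
--     q = (pos + 1) % len(positions)
--     for j in range(iterations, 0, -1):
--         if q == positions[j]:
--             return j
--         if positions[j] < q:
--             q -= 1
--     return 0
-- ===== Notes on version B (the rewrite author's own statement) =====
-- stated objective: faster
-- what changed: B never builds the buffer: it records each value's insertion position in O(1) per step, then walks the insertions backwards to find which value ends up in the slot after the final position, O(n) total instead of A's O(n^2) mid-list inserts.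
import Mathlib
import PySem

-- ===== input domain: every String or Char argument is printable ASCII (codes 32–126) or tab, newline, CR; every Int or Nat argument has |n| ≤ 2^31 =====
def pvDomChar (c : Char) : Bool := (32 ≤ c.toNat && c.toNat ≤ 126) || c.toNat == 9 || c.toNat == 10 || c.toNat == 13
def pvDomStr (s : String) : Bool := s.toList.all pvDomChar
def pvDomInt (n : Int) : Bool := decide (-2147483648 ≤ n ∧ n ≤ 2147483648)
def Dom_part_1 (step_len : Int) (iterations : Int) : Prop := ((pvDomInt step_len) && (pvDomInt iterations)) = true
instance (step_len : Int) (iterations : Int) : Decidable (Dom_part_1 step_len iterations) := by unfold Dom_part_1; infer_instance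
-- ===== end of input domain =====

-- B never builds the buffer: it records each insertion position, then walks the
-- insertions backwards to find the value after the final position (objective: faster).

-- ===== PORT A =====
-- loop body of A: state = (buffer, pos, n); the range element is unused
def part1Body (step_len : Int) (st : List Int × Int × Int) (_it : Int) :
    List Int × Int × Int :=
  let pos := PySem.Int.mod (st.2.1 + step_len) (st.1.length : Int)
  let n := st.2.2 + 1
  let pos := pos + 1
  (PySem.List.insert st.1 pos n, pos, n)

def part_1 (step_len : Int) (iterations : Int) : Int :=
  let st := (PySem.List.pyRange 0 iterations 1).foldl (part1Body step_len) ([0], 0, 0)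
  -- buffer[(pos+1)%len(buffer)]: the index is always in range (len ≥ 1), so getD is exact
  (PySem.List.pyGet? st.1 (PySem.Int.mod (st.2.1 + 1) (st.1.length : Int))).getD 0

-- ===== PORT B =====
-- forward loop body of B: state = (positions, pos); the range element j is the
-- buffer length at that step
def part1AltBody (step_len : Int) (st : List Int × Int) (j : Int) : List Int × Int :=
  let pos := PySem.Int.mod (st.2 + step_len) j + 1
  (st.1 ++ [pos], pos)

-- backward loop of B over the countdown range, with early return;
-- positions[j] is always in range here, so getD is exact
def backScan (positions : List Int) : List Int → Int → Int
  | [], _q => 0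
  | j :: rest, q =>
    let pj := (PySem.List.pyGet? positions j).getD 0
    if q = pj then j
    else if pj < q then backScan positions rest (q - 1)
    else backScan positions rest q

def part_1_alt (step_len : Int) (iterations : Int) : Int :=
  let st := (PySem.List.pyRange 1 (iterations + 1) 1).foldl (part1AltBody step_len) ([0], 0)
  let q := PySem.Int.mod (st.2 + 1) (st.1.length : Int)
  backScan st.1 (PySem.List.pyRange iterations 0 (-1)) q

-- ===== PRECONDITION & SPEC =====
def Spec_part_1 (step_len : Int) (iterations : Int) (out : Int) : Prop := out = part_1_alt step_len iterations
instance (step_len : Int) (iterations : Int) (out : Int) : Decidable (Spec_part_1 step_len iterations out) := by unfold Spec_part_1; infer_instance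

-- ===== CLAIM (what is proved, stated in full; the proofs are below) =====
def Claim_equal_part_1 : Prop := ∀ (step_len : Int) (iterations : Int), Dom_part_1 step_len iterations → Spec_part_1 step_len iterations (part_1 step_len iterations)

-- ===== LEMMAS AND PROOFS =====

-- A's state, buffer and position after k iterations (proof-side abbreviations)
def stA (step_len : Int) (k : Nat) : List Int × Int × Int :=
  (PySem.List.pyRange 0 (k : Int) 1).foldl (part1Body step_len) ([0], 0, 0)
def bufA (step_len : Int) (k : Nat) : List Int := (stA step_len k).1
def posA (step_len : Int) (k : Nat) : Int := (stA step_len k).2.1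

lemma stA_zero (step_len : Int) : stA step_len 0 = ([0], 0, 0) := by
  unfold stA
  rw [Nat.cast_zero, PySem.List.pyRange_one_eq_nil (by omega), List.foldl_nil]

lemma stA_succ (step_len : Int) (k : Nat) :
    stA step_len (k + 1) = part1Body step_len (stA step_len k) (k : Int) := by
  unfold stA
  rw [show ((k + 1 : Nat) : Int) = (k : Int) + 1 by push_cast; ring,
      PySem.List.pyRange_one_succ_right (by omega), List.foldl_append,
      List.foldl_cons, List.foldl_nil]

-- basic invariant of A's loop
lemma invA (step_len : Int) (k : Nat) :
    (stA step_len k).2.2 = (k : Int) ∧ (bufA step_len k).length = k + 1 ∧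
    0 ≤ posA step_len k ∧ posA step_len k < (k : Int) + 1 ∧
    (0 < k → 1 ≤ posA step_len k) := by
  induction k with
  | zero =>
    refine ⟨?_, ?_, ?_, ?_, ?_⟩ <;> simp [bufA, posA, stA_zero]
  | succ k ih =>
    obtain ⟨hn, hlen, hpos0, hposlt, -⟩ := ih
    have hL : (0 : Int) < ((bufA step_len k).length : Int) := by rw [hlen]; push_cast; omega
    have hm0 : 0 ≤ (posA step_len k + step_len) % ((bufA step_len k).length : Int) :=
      Int.emod_nonneg _ (by omega)
    have hmlt : (posA step_len k + step_len) % ((bufA step_len k).length : Int)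
        < ((bufA step_len k).length : Int) := Int.emod_lt_of_pos _ hL
    refine ⟨?_, ?_, ?_, ?_, ?_⟩
    · show (stA step_len (k + 1)).2.2 = ((k + 1 : Nat) : Int)
      rw [stA_succ]
      show (stA step_len k).2.2 + 1 = ((k + 1 : Nat) : Int)
      rw [hn]; push_cast; ring
    · show (stA step_len (k + 1)).1.length = k + 1 + 1
      rw [stA_succ]
      show (PySem.List.insert (bufA step_len k) _ _).length = k + 1 + 1
      rw [PySem.List.length_insert]
      omega
    · show 0 ≤ (stA step_len (k + 1)).2.1
      rw [stA_succ]
      show 0 ≤ PySem.Int.mod (posA step_len k + step_len) ((bufA step_len k).length : Int) + 1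
      rw [PySem.Int.mod_eq_emod_of_pos hL]
      omega
    · show (stA step_len (k + 1)).2.1 < ((k + 1 : Nat) : Int) + 1
      rw [stA_succ]
      show PySem.Int.mod (posA step_len k + step_len) ((bufA step_len k).length : Int) + 1
          < ((k + 1 : Nat) : Int) + 1
      rw [PySem.Int.mod_eq_emod_of_pos hL, hlen]
      rw [hlen] at hmlt
      push_cast at hmlt ⊢
      omega
    · intro _
      show 1 ≤ (stA step_len (k + 1)).2.1
      rw [stA_succ]
      show 1 ≤ PySem.Int.mod (posA step_len k + step_len) ((bufA step_len k).length : Int) + 1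
      rw [PySem.Int.mod_eq_emod_of_pos hL]
      omega

-- the position after one more step, written without the buffer
def pstep (step_len : Int) (k : Nat) : Int :=
  (posA step_len k + step_len) % ((k : Int) + 1) + 1

lemma pstep_pos (step_len : Int) (k : Nat) : 1 ≤ pstep step_len k := by
  unfold pstep
  have := Int.emod_nonneg (posA step_len k + step_len) (show ((k : Int) + 1) ≠ 0 by omega)
  omega

lemma pstep_le (step_len : Int) (k : Nat) : pstep step_len k ≤ (k : Int) + 1 := by
  unfold pstep
  have := Int.emod_lt_of_pos (posA step_len k + step_len) (show (0 : Int) < (k : Int) + 1 by omega)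
  omega

lemma posA_succ (step_len : Int) (k : Nat) :
    posA step_len (k + 1) = pstep step_len k := by
  obtain ⟨-, hlen, -, -, -⟩ := invA step_len k
  have hL : (0 : Int) < ((bufA step_len k).length : Int) := by rw [hlen]; push_cast; omega
  show (stA step_len (k + 1)).2.1 = _
  rw [stA_succ]
  show PySem.Int.mod (posA step_len k + step_len) ((bufA step_len k).length : Int) + 1 = _
  rw [PySem.Int.mod_eq_emod_of_pos hL, pstep, hlen]
  push_cast
  ring_nf

lemma bufA_succ (step_len : Int) (k : Nat) :
    bufA step_len (k + 1) =
      (bufA step_len k).take (pstep step_len k).toNat ++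
        ((k : Int) + 1) :: (bufA step_len k).drop (pstep step_len k).toNat := by
  obtain ⟨hn, hlen, hpos0, hposlt, -⟩ := invA step_len k
  have hL : (0 : Int) < ((bufA step_len k).length : Int) := by rw [hlen]; push_cast; omega
  have hle : (pstep step_len k).toNat ≤ (bufA step_len k).length := by
    have h1 := pstep_le step_len k
    rw [hlen]; omega
  show (stA step_len (k + 1)).1 = _
  rw [stA_succ]
  show PySem.List.insert (bufA step_len k)
      (PySem.Int.mod (posA step_len k + step_len) ((bufA step_len k).length : Int) + 1)
      ((stA step_len k).2.2 + 1) = _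
  have hp : PySem.Int.mod (posA step_len k + step_len) ((bufA step_len k).length : Int) + 1
      = (((pstep step_len k).toNat : Nat) : Int) := by
    rw [PySem.Int.mod_eq_emod_of_pos hL, Int.toNat_of_nonneg (by have := pstep_pos step_len k; omega)]
    rw [pstep, hlen]; push_cast; ring
  rw [hp, hn, PySem.List.insert_natCast _ _ _ hle]

-- B's forward loop computes exactly A's positions
lemma invB (step_len : Int) (k : Nat) :
    ((PySem.List.pyRange 1 ((k : Int) + 1) 1).foldl (part1AltBody step_len) ([0], 0)).2
        = posA step_len k ∧
    ((PySem.List.pyRange 1 ((k : Int) + 1) 1).foldl (part1AltBody step_len) ([0], 0)).1.length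
        = k + 1 ∧
    (∀ j : Nat, j ≤ k →
      ((PySem.List.pyRange 1 ((k : Int) + 1) 1).foldl (part1AltBody step_len) ([0], 0)).1[j]?
        = some (posA step_len j)) := by
  induction k with
  | zero =>
    rw [Nat.cast_zero, zero_add, PySem.List.pyRange_one_eq_nil (by omega), List.foldl_nil]
    refine ⟨by simp [posA, stA_zero], rfl, ?_⟩
    intro j hj
    interval_cases j
    simp [posA, stA_zero]
  | succ k ih =>
    obtain ⟨hpos, hlen, hidx⟩ := ih
    rw [show ((k + 1 : Nat) : Int) + 1 = ((k : Int) + 1) + 1 by push_cast; ring,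
        PySem.List.pyRange_one_succ_right (by omega), List.foldl_append,
        List.foldl_cons, List.foldl_nil]
    set st := (PySem.List.pyRange 1 ((k : Int) + 1) 1).foldl (part1AltBody step_len) ([0], 0)
      with hst
    have hstep : part1AltBody step_len st ((k : Int) + 1)
        = (st.1 ++ [pstep step_len k], pstep step_len k) := by
      simp only [part1AltBody]
      rw [PySem.Int.mod_eq_emod_of_pos (by omega), hpos, pstep]
    rw [hstep]
    refine ⟨by rw [posA_succ], by simp [hlen], ?_⟩
    intro j hj
    rcases Nat.lt_or_ge j (k + 1) with hlt | hge
    · show (st.1 ++ [pstep step_len k])[j]? = _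
      rw [List.getElem?_append_left (by omega), hidx j (by omega)]
    · have hj' : j = k + 1 := by omega
      subst hj'
      show (st.1 ++ [pstep step_len k])[k + 1]? = _
      rw [List.getElem?_append_right (by omega), hlen, posA_succ]
      simp
-- the backward scan reconstructs the buffer entry at index q
lemma backScan_eq (step_len : Int) (P : List Int) (k : Nat) (q : Int)
    (hP : ∀ j : Nat, 1 ≤ j → j ≤ k → P[j]? = some (posA step_len j))
    (hq0 : 0 ≤ q) (hqlt : q < (k : Int) + 1) :
    backScan P (PySem.List.pyRange (k : Int) 0 (-1)) q
      = ((bufA step_len k)[q.toNat]?).getD 0 := by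
  induction k generalizing q with
  | zero =>
    rw [Nat.cast_zero, PySem.List.pyRange_neg_one_eq_nil (by omega)]
    have hq : q = 0 := by omega
    subst hq
    simp [backScan, bufA, stA_zero]
  | succ k ih =>
    rw [show ((k + 1 : Nat) : Int) = (k : Int) + 1 by push_cast; ring,
        PySem.List.pyRange_neg_one_cons (by omega),
        show ((k : Int) + 1) - 1 = (k : Int) by ring]
    have hPj : (PySem.List.pyGet? P ((k : Int) + 1)).getD 0 = pstep step_len k := by
      rw [show ((k : Int) + 1) = ((k + 1 : Nat) : Int) by push_cast; ring,
          PySem.List.pyGet?_natCast, hP (k + 1) (by omega) (by omega), posA_succ]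
      rfl
    obtain ⟨-, hlen, -, -, -⟩ := invA step_len k
    have hp1 := pstep_pos step_len k
    have hp2 := pstep_le step_len k
    set p : Int := pstep step_len k with hpdef
    have htake : ((bufA step_len k).take p.toNat).length = p.toNat := by
      rw [List.length_take]; omega
    rw [backScan]
    simp only [hPj]
    rw [bufA_succ]
    by_cases h1 : q = p
    · subst h1
      rw [if_pos rfl, List.getElem?_append_right (le_of_eq htake)]
      rw [htake]
      simp
    · rw [if_neg h1]
      by_cases h2 : p < q
      · rw [if_pos h2,
            ih (q - 1) (fun j h1' h2' => hP j h1' (by omega)) (by omega) (by omega),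
            List.getElem?_append_right (by rw [htake]; omega), htake]
        have hc : q.toNat - p.toNat ≥ 1 := by omega
        rw [show q.toNat - p.toNat = (q.toNat - p.toNat - 1) + 1 by omega]
        simp only [List.getElem?_cons_succ, List.getElem?_drop]
        congr 2
        omega
      · rw [if_neg h2,
            ih q (fun j h1' h2' => hP j h1' (by omega)) (by omega) (by omega),
            List.getElem?_append_left (by rw [htake]; omega)]
        have hq : q.toNat < p.toNat := by omega
        have ht : ((bufA step_len k).take p.toNat)[q.toNat]? = (bufA step_len k)[q.toNat]? := by
          simp [hq]
        rw [ht]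

-- the two ports agree for a nonnegative iteration count
lemma agree (step_len : Int) (k : Nat) :
    part_1 step_len (k : Int) = part_1_alt step_len (k : Int) := by
  obtain ⟨hn, hlen, hpos0, hposlt, -⟩ := invA step_len k
  obtain ⟨hbpos, hblen, hbidx⟩ := invB step_len k
  simp only [part_1, part_1_alt]
  rw [show (PySem.List.pyRange 0 (k : Int) 1).foldl (part1Body step_len) ([0], 0, 0)
        = stA step_len k from rfl]
  have hL : (0 : Int) < ((bufA step_len k).length : Int) := by rw [hlen]; push_cast; omega
  have hA : PySem.Int.mod ((stA step_len k).2.1 + 1) (((stA step_len k).1.length : Nat) : Int)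
      = (posA step_len k + 1) % ((bufA step_len k).length : Int) := by
    exact PySem.Int.mod_eq_emod_of_pos hL
  set j : Int := (posA step_len k + 1) % ((bufA step_len k).length : Int) with hj
  have hj0 : 0 ≤ j := Int.emod_nonneg _ (by omega)
  have hjlt : j < ((bufA step_len k).length : Int) := Int.emod_lt_of_pos _ hL
  rw [hA, PySem.List.pyGet?_of_nonneg _ hj0, hbpos, hblen]
  have hB : PySem.Int.mod (posA step_len k + 1) ((k + 1 : Nat) : Int) = j := by
    rw [PySem.Int.mod_eq_emod_of_pos (by push_cast; omega), hj, hlen]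
  rw [hB, backScan_eq step_len _ k j (fun i h1 h2 => hbidx i h2) hj0
        (by rw [hlen] at hjlt; push_cast at hjlt ⊢; omega)]
  rfl

-- ===== VERDICT (by name: the statement is the Claim_ definition above) =====
theorem part_1_spec : Claim_equal_part_1 := by
  unfold Claim_equal_part_1 Spec_part_1
  intro step_len iterations _
  by_cases h : iterations ≤ 0
  · simp only [part_1, part_1_alt]
    rw [PySem.List.pyRange_one_eq_nil h, PySem.List.pyRange_one_eq_nil (by omega),
        PySem.List.pyRange_neg_one_eq_nil (by omega)]
    simp only [List.foldl_nil]
    decide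
  · have hk : ((iterations.toNat : Nat) : Int) = iterations := Int.toNat_of_nonneg (by omega)
    rw [← hk]
    exact agree step_len iterations.toNat
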